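-- pv_equiv track=rewrite | github.com/SivaKumar-004/VIT-Hackathon | main.py | determine_specialty_and_doctor
-- ===== SOURCE A (Python) =====
-- doctors_db = {
--     "dr_smith": {"id": "dr_smith", "name": "Dr. Smith", "specialty": "Cardiology", "available": True},
--     "dr_jones": {"id": "dr_jones", "name": "Dr. Jones", "specialty": "General", "available": True},
--     "dr_lee": {"id": "dr_lee", "name": "Dr. Lee", "specialty": "Orthopedics", "available": False},
-- }
--
-- def determine_specialty_and_doctor(req_type: str) -> dict:
--     """Rule-based routing logic to find specialty and available doctor"""
--     req_type_lower = req_type.lower()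
--
--     # Simple NLP rules
--     if "heart" in req_type_lower or "cardio" in req_type_lower or "chest" in req_type_lower:
--         specialty = "Cardiology"
--     elif "bone" in req_type_lower or "fracture" in req_type_lower or "broken" in req_type_lower:
--         specialty = "Orthopedics"
--     else:
--         specialty = "General"
--
--     # Find available doctor
--     assigned_doctor = None
--     for doc in doctors_db.values():
--         if doc["specialty"] == specialty and doc["available"]:
--             assigned_doctor = doc["id"]
--             break # Found an available doctor
--
--     # Default to general if specialty doctor unavailable
--     if not assigned_doctor and specialty != "General":
--         for doc in doctors_db.values():
--              if doc["specialty"] == "General" and doc["available"]: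
--                  assigned_doctor = doc["id"]
--                  break
--
--     return {
--         "specialty": specialty,
--         "assigned_doctor": assigned_doctor
--     }
-- ===== SOURCE B (Python) =====
-- doctors_db = {
--     "dr_smith": {"id": "dr_smith", "name": "Dr. Smith", "specialty": "Cardiology", "available": True},
--     "dr_jones": {"id": "dr_jones", "name": "Dr. Jones", "specialty": "General", "available": True},
--     "dr_lee": {"id": "dr_lee", "name": "Dr. Lee", "specialty": "Orthopedics", "available": False},
-- }
--
-- KEYWORD_TABLE = [
--     (("heart", "cardio", "chest"), "Cardiology"),
--     (("bone", "fracture", "broken"), "Orthopedics"),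
-- ]
--
-- def determine_specialty_and_doctor(req_type: str) -> dict:
--     """Table-driven routing: keyword table + one-pass specialty->doctor index."""
--     text = req_type.lower()
--     specialty = next(
--         (spec for keywords, spec in KEYWORD_TABLE if any(k in text for k in keywords)),
--         "General",
--     )
--     spec_to_doc = {}
--     for doc in doctors_db.values():
--         if doc["available"] and doc["specialty"] not in spec_to_doc:
--             spec_to_doc[doc["specialty"]] = doc["id"]
--     assigned = spec_to_doc.get(specialty, spec_to_doc.get("General"))
--     return {"specialty": specialty, "assigned_doctor": assigned}
-- ===== Notes on version B (the rewrite author's own statement) =====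
-- stated objective: idiomatic
-- what changed: B replaces A's if/elif keyword chain and two repeated break-scans over doctors_db with a table-driven keyword match plus a single-pass specialty-to-first-available-doctor index resolved by dict lookups with a General fallback.
import Mathlib
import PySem

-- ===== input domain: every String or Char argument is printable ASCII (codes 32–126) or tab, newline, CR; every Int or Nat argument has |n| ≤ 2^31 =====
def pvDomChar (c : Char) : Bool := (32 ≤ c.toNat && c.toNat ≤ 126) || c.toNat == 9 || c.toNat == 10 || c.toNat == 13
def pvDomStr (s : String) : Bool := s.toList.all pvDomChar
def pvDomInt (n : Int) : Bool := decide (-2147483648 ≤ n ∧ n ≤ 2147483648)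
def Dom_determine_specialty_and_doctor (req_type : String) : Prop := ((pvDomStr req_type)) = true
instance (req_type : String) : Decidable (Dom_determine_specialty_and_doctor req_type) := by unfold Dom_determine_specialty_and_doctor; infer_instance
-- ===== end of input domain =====

-- B replaces A's two repeated break-scans over doctors_db with a table-driven keyword match
-- plus a one-pass specialty→first-available-doctor index and constant lookups (objective: idiomatic).

-- ===== PORT A =====
-- doctors_db.values(), each doctor as (id, name, specialty, available)
def pvDoctorsA : List (String × String × String × Bool) :=
  [("dr_smith", "Dr. Smith", "Cardiology", true),
   ("dr_jones", "Dr. Jones", "General", true),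
   ("dr_lee", "Dr. Lee", "Orthopedics", false)]

-- the 'for doc in doctors_db.values(): … break' loop of A
def pvFindDocA (docs : List (String × String × String × Bool)) (specialty : String) : Option String :=
  match docs with
  | [] => none
  | (id, _, spec, avail) :: rest =>
      if spec == specialty && avail then some id else pvFindDocA rest specialty

def determine_specialty_and_doctor (req_type : String) : List (String × Option String) :=
  let req_type_lower := PySem.Str.lower req_type
  let specialty :=
    if PySem.Str.isIn "heart" req_type_lower || PySem.Str.isIn "cardio" req_type_lower ||
       PySem.Str.isIn "chest" req_type_lower then "Cardiology"
    else if PySem.Str.isIn "bone" req_type_lower || PySem.Str.isIn "fracture" req_type_lower ||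
            PySem.Str.isIn "broken" req_type_lower then "Orthopedics"
    else "General"
  let assigned_doctor := pvFindDocA pvDoctorsA specialty
  let assigned_doctor :=
    if assigned_doctor == none && specialty != "General" then pvFindDocA pvDoctorsA "General"
    else assigned_doctor
  [("specialty", specialty), ("assigned_doctor", assigned_doctor)]

-- ===== PORT B =====
def pvDoctorsB : List (String × String × String × Bool) :=
  [("dr_smith", "Dr. Smith", "Cardiology", true),
   ("dr_jones", "Dr. Jones", "General", true),
   ("dr_lee", "Dr. Lee", "Orthopedics", false)]

def pvKeywordTable : List (List String × String) :=
  [(["heart", "cardio", "chest"], "Cardiology"),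
   (["bone", "fracture", "broken"], "Orthopedics")]

def determine_specialty_and_doctor_alt (req_type : String) : List (String × Option String) :=
  let text := PySem.Str.lower req_type
  let specialty :=
    ((pvKeywordTable.find? (fun row => row.1.any (fun k => PySem.Str.isIn k text))).map
      Prod.snd).getD "General"
  let spec_to_doc :=
    pvDoctorsB.foldl
      (fun d (doc : String × String × String × Bool) =>
        if doc.2.2.2 && !(d.contains doc.2.2.1) then d.insert doc.2.2.1 doc.1 else d)
      PySem.Dict.empty
  let assigned :=
    match spec_to_doc.get? specialty with
    | some v => some v
    | none => spec_to_doc.get? "General"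
  [("specialty", specialty), ("assigned_doctor", assigned)]

-- ===== PRECONDITION & SPEC =====
def Spec_determine_specialty_and_doctor (req_type : String) (out : List (String × Option String)) : Prop := out = determine_specialty_and_doctor_alt req_type
instance (req_type : String) (out : List (String × Option String)) : Decidable (Spec_determine_specialty_and_doctor req_type out) := by unfold Spec_determine_specialty_and_doctor; infer_instance

-- ===== CLAIM (what is proved, stated in full; the proofs are below) =====
def Claim_equal_determine_specialty_and_doctor : Prop := ∀ (req_type : String), Dom_determine_specialty_and_doctor req_type → Spec_determine_specialty_and_doctor req_type (determine_specialty_and_doctor req_type)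

-- ===== LEMMAS AND PROOFS =====

-- ===== VERDICT (by name: the statement is the Claim_ definition above) =====
theorem determine_specialty_and_doctor_spec : Claim_equal_determine_specialty_and_doctor := by
  intro req_type _
  unfold Spec_determine_specialty_and_doctor determine_specialty_and_doctor determine_specialty_and_doctor_alt
  simp only [pvKeywordTable, List.find?, List.any_cons, List.any_nil, Bool.or_false]
  cases hq0 : PySem.Str.isIn "heart" (PySem.Str.lower req_type) <;>
  cases hq1 : PySem.Str.isIn "cardio" (PySem.Str.lower req_type) <;>
  cases hq2 : PySem.Str.isIn "chest" (PySem.Str.lower req_type) <;>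
  cases hq3 : PySem.Str.isIn "bone" (PySem.Str.lower req_type) <;>
  cases hq4 : PySem.Str.isIn "fracture" (PySem.Str.lower req_type) <;>
  cases hq5 : PySem.Str.isIn "broken" (PySem.Str.lower req_type) <;> rfl
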